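-- pv_equiv track=rewrite | github.com/dev65535/ghidra_tools | dalvik_trace/dalvik_trace.py | get_num_regs_from_param_types
-- ===== SOURCE A (Python) =====
-- def is_double_width_param(param_type):
--     return param_type in ["J", "D"]
--
-- def get_num_regs_from_param_types(param_type_list):
--     """ calculate how many registers we need for a given set of param types - specifically, handle the double width param types """
--     count = 0
--     for param_type in param_type_list:
--         if is_double_width_param(param_type):
--             count += 2
--         else:
--             count += 1
--
--     return count
-- ===== SOURCE B (Python) =====
-- def is_double_width_param(param_type):
--     return param_type in ["J", "D"]
--
-- def get_num_regs_from_param_types(param_type_list):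
--     """each param takes one register; 'J' (long) and 'D' (double) take a second one"""
--     return (len(param_type_list)
--             + param_type_list.count("J")
--             + param_type_list.count("D"))
-- ===== Notes on version B (the rewrite author's own statement) =====
-- stated objective: simpler
-- what changed: Replaced the per-element accumulator with a branchy predicate by three independent whole-list queries: len(list) plus list.count('J') plus list.count('D'); no conditional or membership test per element remains.
import Mathlib
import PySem

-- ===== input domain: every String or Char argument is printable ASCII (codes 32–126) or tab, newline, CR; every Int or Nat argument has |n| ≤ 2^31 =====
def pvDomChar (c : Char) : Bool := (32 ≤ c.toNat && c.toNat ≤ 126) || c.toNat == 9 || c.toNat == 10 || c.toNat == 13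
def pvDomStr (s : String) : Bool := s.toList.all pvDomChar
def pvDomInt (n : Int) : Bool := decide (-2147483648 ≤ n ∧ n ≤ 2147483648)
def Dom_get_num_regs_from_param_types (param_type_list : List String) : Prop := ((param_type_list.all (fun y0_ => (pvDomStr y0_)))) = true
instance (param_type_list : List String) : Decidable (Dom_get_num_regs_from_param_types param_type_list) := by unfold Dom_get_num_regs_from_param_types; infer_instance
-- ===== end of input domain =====

-- B: len(list) + list.count("J") + list.count("D") — three whole-list queries instead of A's per-element branching accumulator (simpler).
-- ===== PORT A =====
def is_double_width_param (param_type : String) : Bool :=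
  param_type ∈ ["J", "D"]

def get_num_regs_from_param_types (param_type_list : List String) : Int :=
  param_type_list.foldl (fun count param_type =>
    if is_double_width_param param_type then count + 2 else count + 1) 0

-- ===== PORT B =====
def get_num_regs_from_param_types_alt (param_type_list : List String) : Int :=
  (param_type_list.length : Int)
    + (PySem.List.count param_type_list "J" : Int)
    + (PySem.List.count param_type_list "D" : Int)

-- ===== PRECONDITION & SPEC =====
def Spec_get_num_regs_from_param_types (param_type_list : List String) (out : Int) : Prop := out = get_num_regs_from_param_types_alt param_type_list
instance (param_type_list : List String) (out : Int) : Decidable (Spec_get_num_regs_from_param_types param_type_list out) := by unfold Spec_get_num_regs_from_param_types; infer_instance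

-- ===== CLAIM =====
def Claim_equal_get_num_regs_from_param_types : Prop := ∀ (param_type_list : List String), Dom_get_num_regs_from_param_types param_type_list → Spec_get_num_regs_from_param_types param_type_list (get_num_regs_from_param_types param_type_list)

-- ===== LEMMAS AND PROOFS =====
-- loop invariant: A's fold starting at c equals c + len + count "J" + count "D"
theorem foldA_eq (l : List String) (c : Int) :
    l.foldl (fun count param_type =>
      if is_double_width_param param_type then count + 2 else count + 1) c
    = c + (l.length : Int) + (l.count "J" : Int) + (l.count "D" : Int) := by
  induction l generalizing c with
  | nil => simp
  | cons h t ih =>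
    simp only [List.foldl, List.count_cons, List.length_cons]
    by_cases hJ : h = "J"
    · rw [ih]; simp [hJ, is_double_width_param]; ring
    · by_cases hD : h = "D"
      · rw [ih]; simp [hJ, hD, is_double_width_param]; ring
      · rw [ih]
        have : is_double_width_param h = false := by
          simp [is_double_width_param, hJ, hD]
        simp [this, hJ, hD, Ne.symm hJ, Ne.symm hD]; ring

-- ===== VERDICT =====
theorem get_num_regs_from_param_types_spec : Claim_equal_get_num_regs_from_param_types := by
  intro l _
  unfold Spec_get_num_regs_from_param_types get_num_regs_from_param_types get_num_regs_from_param_types_alt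
  rw [foldA_eq, PySem.List.count_eq, PySem.List.count_eq]; ring
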